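-- pv_equiv track=rewrite | github.com/Aruko21/RC6_hackaton_ECM | ecm_linkers/composition_linker.py | compose_containers_adj
-- ===== SOURCE A (Python) =====
-- def compose_containers_adj(adj_matrix, containers):
--     n = len(containers)
--     external_rel_matrix = [[0 for j in range(n)] for i in range(n)]
--
--     for i in range(n - 1):
--         for j in range(i + 1, n):
--             v1 = containers[i]
--             v2 = containers[j]
--             for h in v1:
--                 for d in v2:
--                     if adj_matrix[h][d] != 0:
--                         external_rel_matrix[i][j] += 1
--
--             external_rel_matrix[j][i] = external_rel_matrix[i][j]
--
--     # На выход - матрица смежностей контейнеров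
--     return external_rel_matrix
-- ===== SOURCE B (Python) =====
-- def compose_containers_adj(adj_matrix, containers):
--     n = len(containers)
--     # multiplicity map (ordered counter) per container
--     multis = []
--     for v in containers:
--         c = {}
--         for x in v:
--             c[x] = c.get(x, 0) + 1
--         multis.append(c)
--
--     def cell(i, j):
--         if i == j:
--             return 0
--         a, b = (i, j) if i < j else (j, i)
--         s = 0
--         for h, mh in multis[a].items():
--             for d, md in multis[b].items():
--                 if adj_matrix[h][d] != 0:
--                     s += mh * md
--         return s
--
--     return [[cell(i, j) for j in range(n)] for i in range(n)]
-- ===== Notes on version B (the rewrite author's own statement) =====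
-- stated objective: alternative
-- what changed: B replaces A's in-place matrix mutation over vertex-occurrence rescans by per-container ordered multiplicity maps (counters) and a pure per-cell computation summing mult(h)*mult(d) over distinct vertex pairs, building the symmetric matrix by comprehension instead of mirrored assignment.
import Mathlib
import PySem

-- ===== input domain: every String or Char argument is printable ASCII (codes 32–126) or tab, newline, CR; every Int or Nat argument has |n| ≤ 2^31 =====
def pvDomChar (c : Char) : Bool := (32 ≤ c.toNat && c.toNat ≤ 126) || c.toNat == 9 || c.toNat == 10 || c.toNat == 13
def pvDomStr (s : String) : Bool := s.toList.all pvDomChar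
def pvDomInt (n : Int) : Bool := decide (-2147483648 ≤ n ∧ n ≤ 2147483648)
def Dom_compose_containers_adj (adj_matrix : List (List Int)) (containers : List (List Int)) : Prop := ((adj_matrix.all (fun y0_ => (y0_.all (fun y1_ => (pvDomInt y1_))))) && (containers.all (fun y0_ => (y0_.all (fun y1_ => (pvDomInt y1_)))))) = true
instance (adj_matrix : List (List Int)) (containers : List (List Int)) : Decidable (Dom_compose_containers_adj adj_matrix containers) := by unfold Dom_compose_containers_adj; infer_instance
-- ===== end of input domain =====

-- B replaces A's in-place mutated matrix over per-occurrence rescans by per-container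
-- multiplicity maps (ordered counters) and a pure per-cell sum over distinct vertex pairs
-- (objective: alternative; same return value).

-- shared primitive: the Python test 'adj_matrix[h][d] != 0' (appears verbatim in both sources)
def pvEdge (adj_matrix : List (List Int)) (h d : Int) : Bool :=
  decide (((PySem.List.pyGet? adj_matrix h).bind (fun r => PySem.List.pyGet? r d)).getD 0 ≠ 0)

-- ===== PORT A =====
-- external_rel_matrix[i][j] += 1
def pvBump (m : List (List Int)) (i j : Nat) : List (List Int) :=
  m.modify i (fun row => row.modify j (· + 1))

-- body of A's j-loop: scan all occurrence pairs of containers[i] × containers[j], then mirror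
def pvStepA (adj_matrix containers : List (List Int)) (m : List (List Int)) (i j : Nat) :
    List (List Int) :=
  let v1 := containers.getD i []
  let v2 := containers.getD j []
  let m' := v1.foldl (fun m h => v2.foldl (fun m d =>
      if pvEdge adj_matrix h d then pvBump m i j else m) m) m
  -- external_rel_matrix[j][i] = external_rel_matrix[i][j]
  m'.modify j (fun row => row.set i ((m'.getD i []).getD j 0))

def compose_containers_adj (adj_matrix : List (List Int)) (containers : List (List Int)) : List (List Int) :=
  let n := containers.length
  let ext0 := (List.range n).map (fun _ => (List.range n).map (fun _ => (0 : Int)))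
  (List.range (n - 1)).foldl (fun ext i =>
    (List.range' (i + 1) (n - 1 - i)).foldl (fun ext j => pvStepA adj_matrix containers ext i j) ext) ext0

-- ===== PORT B =====
-- ordered multiplicity map of a container (Python: c[x] = c.get(x, 0) + 1)
def pvCounter (v : List Int) : PySem.Dict Int Int :=
  v.foldl (fun c x => c.insert x (c.getD x 0 + 1)) PySem.Dict.empty

-- B's cell(i, j)
def pvCell (adj_matrix : List (List Int)) (multis : List (PySem.Dict Int Int)) (i j : Nat) : Int :=
  if i = j then 0
  else
    let a := min i j
    let b := max i j
    ((multis.getD a PySem.Dict.empty).items).foldl (fun s hm =>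
      ((multis.getD b PySem.Dict.empty).items).foldl (fun s dm =>
        if pvEdge adj_matrix hm.1 dm.1 then s + hm.2 * dm.2 else s) s) 0

def compose_containers_adj_alt (adj_matrix : List (List Int)) (containers : List (List Int)) : List (List Int) :=
  let n := containers.length
  let multis := containers.map pvCounter
  (List.range n).map (fun i => (List.range n).map (fun j => pvCell adj_matrix multis i j))

-- ===== PRECONDITION & SPEC =====
-- Pre_ = exactly the inputs on which A returns: every adjacency lookup adj_matrix[h][d]
-- that A performs (h in an earlier container, d in a later one) is in range in Python's
-- sense (negative indices wrap); otherwise A raises IndexError.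
def Pre_compose_containers_adj (adj_matrix : List (List Int)) (containers : List (List Int)) : Prop :=
  List.Pairwise (fun v1 v2 => ∀ h ∈ v1, ∀ d ∈ v2,
    ((PySem.List.pyGet? adj_matrix h).bind (fun r => PySem.List.pyGet? r d)).isSome = true) containers

instance (adj_matrix : List (List Int)) (containers : List (List Int)) : Decidable (Pre_compose_containers_adj adj_matrix containers) := by unfold Pre_compose_containers_adj; infer_instance

def pvWitness_compose_containers_adj : List (List Int) × List (List Int) :=
  ([[1, 0], [0, 1]], [[0], [1]])

def Spec_compose_containers_adj (adj_matrix : List (List Int)) (containers : List (List Int)) (out : List (List Int)) : Prop := out = compose_containers_adj_alt adj_matrix containers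
instance (adj_matrix : List (List Int)) (containers : List (List Int)) (out : List (List Int)) : Decidable (Spec_compose_containers_adj adj_matrix containers out) := by unfold Spec_compose_containers_adj; infer_instance

-- ===== CLAIM (what is proved, stated in full; the proofs are below) =====
def Claim_equal_compose_containers_adj : Prop := ∀ (adj_matrix : List (List Int)) (containers : List (List Int)), Dom_compose_containers_adj adj_matrix containers → Pre_compose_containers_adj adj_matrix containers → Spec_compose_containers_adj adj_matrix containers (compose_containers_adj adj_matrix containers)

-- ===== LEMMAS AND PROOFS =====

-- number of (occurrence) pairs (h, d) ∈ va × vb joined by an edge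
def pvPairSum (adj : List (List Int)) (va vb : List Int) : Int :=
  (va.map (fun h => ((vb.map (fun d => if pvEdge adj h d then (1 : Int) else 0)).sum))).sum

def pvPS (adj containers : List (List Int)) (x y : Nat) : Int :=
  pvPairSum adj (containers.getD x []) (containers.getD y [])

-- add c to cell (i, j)
def pvAdd (m : List (List Int)) (i j : Nat) (c : Int) : List (List Int) :=
  m.modify i (fun row => row.modify j (· + c))

def pvGd (m : List (List Int)) (x y : Nat) : Int := (m.getD x []).getD y 0

def pvShape (m : List (List Int)) (n : Nat) : Prop :=
  m.length = n ∧ ∀ r ∈ m, r.length = n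

def pvRun (adj containers : List (List Int)) (P : List (Nat × Nat)) (m : List (List Int)) :
    List (List Int) :=
  P.foldl (fun m p => pvStepA adj containers m p.1 p.2) m

def pvPairs (n : Nat) : List (Nat × Nat) :=
  (List.range (n - 1)).flatMap (fun i => (List.range' (i + 1) (n - 1 - i)).map (fun j => (i, j)))

theorem modify_modify {α : Type} (l : List α) (i : Nat) (f g : α → α) :
    (l.modify i f).modify i g = l.modify i (fun a => g (f a)) := by
  apply List.ext_getElem?
  intro j
  simp only [List.getElem?_modify, Option.map_eq_map, Option.map_map]
  by_cases h : i = j <;> simp [h, Function.comp_def]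

theorem modify_id {α : Type} (l : List α) (i : Nat) : l.modify i (fun a => a) = l := by
  apply List.ext_getElem?
  intro j
  simp [List.getElem?_modify]

theorem pvAdd_zero (m : List (List Int)) (i j : Nat) : pvAdd m i j 0 = m := by
  unfold pvAdd
  simp only [add_zero, modify_id]

theorem pvAdd_pvAdd (m : List (List Int)) (i j : Nat) (c c' : Int) :
    pvAdd (pvAdd m i j c) i j c' = pvAdd m i j (c + c') := by
  unfold pvAdd
  rw [modify_modify]
  congr 1
  funext row
  rw [modify_modify]
  congr 1
  funext a
  ring

theorem foldl_pvAdd {α : Type} (L : List α) (f : α → Int) (m : List (List Int)) (i j : Nat) :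
    L.foldl (fun m x => pvAdd m i j (f x)) m = pvAdd m i j ((L.map f).sum) := by
  induction L generalizing m with
  | nil => simp [pvAdd_zero]
  | cons x L ih => simp [List.foldl_cons, ih, pvAdd_pvAdd]

theorem foldl_bump_single (L : List Int) (p : Int → Bool) (m : List (List Int)) (i j : Nat) :
    L.foldl (fun m d => if p d then pvBump m i j else m) m
      = pvAdd m i j ((L.map (fun d => if p d then (1 : Int) else 0)).sum) := by
  induction L generalizing m with
  | nil => simp [pvAdd_zero]
  | cons d L ih =>
    by_cases h : p d
    · have hb : pvBump m i j = pvAdd m i j 1 := rfl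
      simp [List.foldl_cons, h, ih, hb, pvAdd_pvAdd]
    · simp [List.foldl_cons, h, ih]

theorem foldl_foldl_bump (v1 v2 : List Int) (p : Int → Int → Bool) (m : List (List Int))
    (i j : Nat) :
    v1.foldl (fun m h => v2.foldl (fun m d => if p h d then pvBump m i j else m) m) m
      = pvAdd m i j
          ((v1.map (fun h => ((v2.map (fun d => if p h d then (1 : Int) else 0)).sum))).sum) := by
  simp only [foldl_bump_single]
  exact foldl_pvAdd v1 _ m i j

theorem pvGd_pvAdd (m : List (List Int)) (n i j x y : Nat) (c : Int) (hs : pvShape m n)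
    (hi : i < n) (hj : j < n) (hx : x < n) (hy : y < n) :
    pvGd (pvAdd m i j c) x y = if x = i ∧ y = j then pvGd m x y + c else pvGd m x y := by
  obtain ⟨hlen, hrow⟩ := hs
  have hx' : x < m.length := by omega
  have hmx : m[x]? = some m[x] := List.getElem?_eq_getElem hx'
  have hylen : y < m[x].length := by
    have := hrow m[x] (List.getElem_mem hx')
    omega
  unfold pvGd pvAdd
  simp only [List.getD_eq_getElem?_getD, List.getElem?_modify, hmx, Option.map_eq_map,
    Option.map_some, Option.getD_some]
  by_cases hix : i = x
  · subst hix
    simp only [if_pos rfl]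
    have hmy : m[i][y]? = some m[i][y] := List.getElem?_eq_getElem hylen
    simp only [List.getElem?_modify, hmy, Option.map_eq_map, Option.map_some, Option.getD_some]
    by_cases hjy : j = y
    · subst hjy; simp [hmy]
    · have hyj : y ≠ j := fun h => hjy h.symm
      simp [List.getElem?_modify, hmy, hjy, hyj]
  · have : ¬ (x = i ∧ y = j) := fun h => hix h.1.symm
    simp [hix, this]

theorem pvShape_pvAdd (m : List (List Int)) (n i j : Nat) (c : Int) (hs : pvShape m n)
    (hi : i < n) :
    pvShape (pvAdd m i j c) n := by
  obtain ⟨hlen, hrow⟩ := hs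
  refine ⟨by simp [pvAdd, hlen], ?_⟩
  intro r hr
  unfold pvAdd at hr
  rw [List.modify_eq_set] at hr
  rcases List.mem_or_eq_of_mem_set hr with h | h
  · exact hrow r h
  · subst h
    have hi' : i < m.length := by omega
    rw [List.length_modify]
    have : m[i]?.getD default = m[i] := by simp [List.getElem?_eq_getElem hi']
    rw [this]
    exact hrow m[i] (List.getElem_mem hi')

theorem pvShape_mirror (m : List (List Int)) (n i j : Nat) (v : Int) (hs : pvShape m n)
    (hj : j < n) :
    pvShape (m.modify j (fun row => row.set i v)) n := by
  obtain ⟨hlen, hrow⟩ := hs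
  refine ⟨by simp [hlen], ?_⟩
  intro r hr
  rw [List.modify_eq_set] at hr
  rcases List.mem_or_eq_of_mem_set hr with h | h
  · exact hrow r h
  · subst h
    have hj' : j < m.length := by omega
    rw [List.length_set]
    have : m[j]?.getD default = m[j] := by simp [List.getElem?_eq_getElem hj']
    rw [this]
    exact hrow m[j] (List.getElem_mem hj')

theorem pvGd_mirror (m : List (List Int)) (n i j x y : Nat) (v : Int) (hs : pvShape m n)
    (hi : i < n) (hj : j < n) (hx : x < n) (hy : y < n) :
    pvGd (m.modify j (fun row => row.set i v)) x y = if x = j ∧ y = i then v else pvGd m x y := by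
  obtain ⟨hlen, hrow⟩ := hs
  have hx' : x < m.length := by omega
  have hmx : m[x]? = some m[x] := List.getElem?_eq_getElem hx'
  have hylen : y < m[x].length := by
    have := hrow m[x] (List.getElem_mem hx')
    omega
  unfold pvGd
  simp only [List.getD_eq_getElem?_getD, List.getElem?_modify, hmx, Option.map_eq_map,
    Option.map_some, Option.getD_some]
  by_cases hjx : j = x
  · subst hjx
    simp only [if_pos rfl, true_and, if_true]
    rw [List.getElem?_set]
    by_cases hiy : i = y
    · subst hiy
      simp [hylen]
    · have hyi : y ≠ i := fun h => hiy h.symm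
      have hmy : m[j][y]? = some m[j][y] := List.getElem?_eq_getElem hylen
      simp [hiy, hyi, hmy]
  · have : ¬ (x = j ∧ y = i) := fun h => hjx h.1.symm
    simp [hjx, this]

-- B-side counting transport
theorem sum_single (K : List Int) (x : Int) (hnd : K.Nodup) (hx : x ∈ K) (g : Int → Int) :
    (K.map (fun k => if k = x then g k else 0)).sum = g x := by
  induction K with
  | nil => cases hx
  | cons y K ih =>
    rcases List.mem_cons.mp hx with h | h
    · have hnot : x ∉ K := by rw [h]; exact (List.nodup_cons.mp hnd).1
      have hz : ((K.map (fun k => if k = x then g k else 0))).sum = 0 := by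
        apply List.sum_eq_zero
        intro z hzm
        rcases List.mem_map.mp hzm with ⟨k, hk, rfl⟩
        have hkx : k ≠ x := fun he => hnot (he ▸ hk)
        simp [hkx]
      rw [List.map_cons, List.sum_cons, hz, add_zero, if_pos h.symm, ← h]
    · have hyx : y ≠ x := fun he => (List.nodup_cons.mp hnd).1 (he ▸ h)
      rw [List.map_cons, List.sum_cons, if_neg hyx, zero_add,
        ih (List.nodup_cons.mp hnd).2 h]

theorem sum_count_transport (K : List Int) (v : List Int) (hnd : K.Nodup)
    (hsub : ∀ x ∈ v, x ∈ K) (g : Int → Int) :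
    (K.map (fun k => (v.count k : Int) * g k)).sum = (v.map g).sum := by
  induction v with
  | nil =>
    apply List.sum_eq_zero
    intro z hz
    rcases List.mem_map.mp hz with ⟨k, hk, rfl⟩
    simp
  | cons x t ih =>
    have hx : x ∈ K := hsub x List.mem_cons_self
    have hsub' : ∀ z ∈ t, z ∈ K := fun z hz => hsub z (List.mem_cons_of_mem x hz)
    have hsplit : ∀ k : Int, ((x :: t).count k : Int) * g k
        = (t.count k : Int) * g k + (if k = x then g k else 0) := by
      intro k
      by_cases h : x = k
      · subst h
        rw [List.count_cons]
        simp only [BEq.rfl, if_true]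
        push_cast
        ring
      · rw [List.count_cons]
        have hbx : (x == k) = false := beq_eq_false_iff_ne.mpr h
        have hkx : k ≠ x := fun he => h he.symm
        rw [hbx, if_neg hkx]
        push_cast
        ring
    calc (K.map (fun k => ((x :: t).count k : Int) * g k)).sum
        = (K.map (fun k => (t.count k : Int) * g k + (if k = x then g k else 0))).sum := by
          exact congrArg List.sum (List.map_congr_left (fun k _ => hsplit k))
      _ = (K.map (fun k => (t.count k : Int) * g k)).sum
            + (K.map (fun k => if k = x then g k else 0)).sum := by
          rw [← List.sum_map_add]
      _ = (t.map g).sum + g x := by rw [ih hsub', sum_single K x hnd hx g]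
      _ = ((x :: t).map g).sum := by simp; ring

theorem foldl_if_add {α : Type} (L : List α) (p : α → Bool) (w : α → Int) (s : Int) :
    L.foldl (fun s x => if p x then s + w x else s) s
      = s + (L.map (fun x => if p x then w x else 0)).sum := by
  induction L generalizing s with
  | nil => simp
  | cons x L ih =>
    by_cases h : p x <;> simp [List.foldl_cons, h, ih] <;> ring

theorem foldl_add_sum {α : Type} (L : List α) (w : α → Int) (s : Int) :
    L.foldl (fun s x => s + w x) s = s + (L.map w).sum := by
  induction L generalizing s with
  | nil => simp
  | cons x L ih => simp [List.foldl_cons, ih]; ring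

theorem foldl_foldl_sum {α β : Type} (L1 : List α) (L2 : List β) (p : α → β → Bool)
    (w : α → β → Int) (s : Int) :
    L1.foldl (fun s x => L2.foldl (fun s y => if p x y then s + w x y else s) s) s
      = s + (L1.map (fun x => ((L2.map (fun y => if p x y then w x y else 0)).sum))).sum := by
  simp only [foldl_if_add]
  exact foldl_add_sum L1 _ s

theorem pvCell_eq (adj containers : List (List Int)) (i j : Nat)
    (hi : i < containers.length) (hj : j < containers.length) (hij : i ≠ j) :
    pvCell adj (containers.map pvCounter) i j = pvPS adj containers (min i j) (max i j) := by
  have ha : min i j < containers.length := by omega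
  have hb : max i j < containers.length := by omega
  have hget : ∀ (k : Nat), k < containers.length →
      (containers.map pvCounter).getD k PySem.Dict.empty = pvCounter (containers.getD k []) := by
    intro k hk
    simp [List.getD_eq_getElem?_getD, List.getElem?_map, List.getElem?_eq_getElem hk]
  have hcounter : ∀ v : List Int, pvCounter v = PySem.Dict.counter v := by
    intro v
    exact PySem.Dict.foldl_insert_getD_add_one_eq_counter v
  set va := containers.getD (min i j) [] with hva
  set vb := containers.getD (max i j) [] with hvb
  unfold pvCell
  rw [if_neg hij]
  simp only [hget _ ha, hget _ hb, ← hva, ← hvb, hcounter, PySem.Dict.items_counter]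
  rw [foldl_foldl_sum]
  simp only [List.map_map, Function.comp_def, zero_add]
  unfold pvPS pvPairSum
  rw [← hva, ← hvb]
  -- transport both counter sums to occurrence sums
  have inner : ∀ h : Int,
      ((PySem.Set.ofList vb).map
        (fun k => if pvEdge adj h k then (va.count h : Int) * (vb.count k : Int) else 0)).sum
      = (va.count h : Int) * ((vb.map (fun d => if pvEdge adj h d then (1 : Int) else 0)).sum) := by
    intro h
    have step1 : ((PySem.Set.ofList vb).map
        (fun k => if pvEdge adj h k then (va.count h : Int) * (vb.count k : Int) else 0)).sum
        = ((PySem.Set.ofList vb).map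
          (fun k => (vb.count k : Int) * (if pvEdge adj h k then (va.count h : Int) else 0))).sum := by
      apply congrArg List.sum
      apply List.map_congr_left
      intro k _
      by_cases he : pvEdge adj h k <;> simp [he] <;> ring
    rw [step1, sum_count_transport (PySem.Set.ofList vb) vb (PySem.Set.nodup_ofList vb)
      (fun z hz => (PySem.Set.mem_ofList vb z).mpr hz)]
    have step2 : (vb.map (fun k => if pvEdge adj h k then (va.count h : Int) else 0)).sum
        = ((vb.map (fun k => (va.count h : Int) * (if pvEdge adj h k then (1 : Int) else 0)))).sum := by
      apply congrArg List.sum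
      apply List.map_congr_left
      intro k _
      by_cases he : pvEdge adj h k <;> simp [he]
    rw [step2, List.sum_map_mul_left]
  calc ((PySem.Set.ofList va).map (fun k =>
        ((PySem.Set.ofList vb).map (fun k2 =>
          if pvEdge adj k k2 then (va.count k : Int) * (vb.count k2 : Int) else 0)).sum)).sum
      = ((PySem.Set.ofList va).map (fun k => (va.count k : Int) *
          ((vb.map (fun d => if pvEdge adj k d then (1 : Int) else 0)).sum))).sum := by
        apply congrArg List.sum
        exact List.map_congr_left (fun k _ => inner k)
    _ = (va.map (fun h => ((vb.map (fun d => if pvEdge adj h d then (1 : Int) else 0)).sum))).sum :=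
        sum_count_transport (PySem.Set.ofList va) va (PySem.Set.nodup_ofList va)
          (fun z hz => (PySem.Set.mem_ofList va z).mpr hz) _

theorem pvStepA_eq (adj containers : List (List Int)) (m : List (List Int)) (i j : Nat) :
    pvStepA adj containers m i j =
      (pvAdd m i j (pvPS adj containers i j)).modify j
        (fun row => row.set i
          (pvGd (pvAdd m i j (pvPS adj containers i j)) i j)) := by
  simp only [pvStepA, pvGd, pvPS, pvPairSum]
  rw [foldl_foldl_bump]

theorem run_spec (adj containers : List (List Int)) (n : Nat) (m : List (List Int))
    (hs : pvShape m n) (hzero : ∀ x y, pvGd m x y = 0) (P : List (Nat × Nat)) :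
    (∀ p ∈ P, p.1 < p.2 ∧ p.2 < n) → P.Nodup →
      pvShape (pvRun adj containers P m) n ∧
        (∀ x y, x < n → y < n →
          pvGd (pvRun adj containers P m) x y =
            if (x, y) ∈ P then pvPS adj containers x y
            else if (y, x) ∈ P then pvPS adj containers y x else 0) := by
  induction P using List.reverseRecOn with
  | nil =>
    intro _ _
    exact ⟨hs, fun x y _ _ => by simp [pvRun, hzero]⟩
  | append_singleton P q ih =>
    intro hP hnd
    obtain ⟨i, j⟩ := q
    have hq : i < j ∧ j < n := hP (i, j) (by simp)
    have hi : i < n := by omega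
    have hj : j < n := hq.2
    have hij : i < j := hq.1
    have hP' : ∀ p ∈ P, p.1 < p.2 ∧ p.2 < n := fun p hp => hP p (by simp [hp])
    have hnd' : P.Nodup := (List.nodup_append.mp hnd).1
    have hqP : (i, j) ∉ P := by
      have hdisj := (List.nodup_append.mp hnd).2.2
      intro hmem
      exact hdisj (i, j) hmem (i, j) (List.mem_singleton.mpr rfl) rfl
    obtain ⟨hshape, hgd⟩ := ih hP' hnd'
    have hrun : pvRun adj containers (P ++ [(i, j)]) m
        = pvStepA adj containers (pvRun adj containers P m) i j := by
      unfold pvRun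
      rw [List.foldl_append]
      rfl
    set M := pvRun adj containers P m with hM
    have hMij : pvGd M i j = 0 := by
      rw [hgd i j hi hj, if_neg hqP, if_neg]
      intro hmem
      have := hP' (j, i) hmem
      omega
    set S := pvPS adj containers i j with hS
    have hgdAdd : ∀ x y, x < n → y < n →
        pvGd (pvAdd M i j S) x y = if x = i ∧ y = j then pvGd M x y + S else pvGd M x y :=
      fun x y hx hy => pvGd_pvAdd M n i j x y S hshape hi hj hx hy
    have hshapeAdd : pvShape (pvAdd M i j S) n := pvShape_pvAdd M n i j S hshape hi
    have hV : pvGd (pvAdd M i j S) i j = S := by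
      rw [hgdAdd i j hi hj, if_pos ⟨rfl, rfl⟩, hMij, zero_add]
    constructor
    · rw [hrun, pvStepA_eq, ← hS]
      exact pvShape_mirror _ n i j _ hshapeAdd hj
    · intro x y hx hy
      rw [hrun, pvStepA_eq, ← hS,
        pvGd_mirror _ n i j x y _ hshapeAdd hi hj hx hy, hV]
      by_cases h1 : x = j ∧ y = i
      · obtain ⟨hx1, hy1⟩ := h1
        rw [if_pos ⟨hx1, hy1⟩]
        have hnp1 : ¬ ((x, y) ∈ P ++ [(i, j)]) := by
          rw [List.mem_append, List.mem_singleton]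
          rintro (hmem | he)
          · have := hP' (x, y) hmem
            omega
          · rw [Prod.mk.injEq] at he
            omega
        have hyp2 : (y, x) ∈ P ++ [(i, j)] := by
          rw [List.mem_append, List.mem_singleton]
          exact Or.inr (by rw [hx1, hy1])
        rw [if_neg hnp1, if_pos hyp2, hx1, hy1]
      · rw [if_neg h1, hgdAdd x y hx hy]
        by_cases h2 : x = i ∧ y = j
        · obtain ⟨hx2, hy2⟩ := h2
          subst hx2
          subst hy2
          rw [if_pos ⟨rfl, rfl⟩, hMij, zero_add]
          have hyp : (x, y) ∈ P ++ [(x, y)] := by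
            rw [List.mem_append, List.mem_singleton]
            exact Or.inr rfl
          rw [if_pos hyp]
        · rw [if_neg h2, hgd x y hx hy]
          have e1 : ((x, y) ∈ P ++ [(i, j)]) ↔ (x, y) ∈ P := by
            rw [List.mem_append, List.mem_singleton]
            constructor
            · rintro (hm | he)
              · exact hm
              · rw [Prod.mk.injEq] at he
                exact absurd ⟨he.1, he.2⟩ h2
            · exact Or.inl
          have e2 : ((y, x) ∈ P ++ [(i, j)]) ↔ (y, x) ∈ P := by
            rw [List.mem_append, List.mem_singleton]
            constructor
            · rintro (hm | he)
              · exact hm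
              · rw [Prod.mk.injEq] at he
                exact absurd ⟨he.2, he.1⟩ h1
            · exact Or.inl
          simp only [e1, e2]

theorem mem_pvPairs (n x y : Nat) : (x, y) ∈ pvPairs n ↔ x < y ∧ y < n := by
  simp only [pvPairs, List.mem_flatMap, List.mem_range, List.mem_map, List.mem_range'_1,
    Prod.mk.injEq]
  constructor
  · rintro ⟨i, hi, j, ⟨hj1, hj2⟩, rfl, rfl⟩
    omega
  · rintro ⟨hxy, hyn⟩
    exact ⟨x, by omega, y, ⟨by omega, by omega⟩, rfl, rfl⟩

theorem nodup_pvPairs (n : Nat) : (pvPairs n).Nodup := by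
  rw [pvPairs, List.nodup_flatMap]
  constructor
  · intro i _
    exact (List.nodup_range' ..).map (fun a b hab => by simpa using hab)
  · have := List.pairwise_lt_range (n := n - 1)
    apply this.imp
    intro a b hab
    intro p hp1 hp2
    rcases List.mem_map.mp hp1 with ⟨j1, _, rfl⟩
    rcases List.mem_map.mp hp2 with ⟨j2, _, he⟩
    have : a = b := by
      have := congrArg Prod.fst he
      simpa using this.symm
    omega

theorem foldl_flatMap' {α β γ : Type} (L : List α) (f : α → List β) (g : γ → β → γ)
    (init : γ) :
    (L.flatMap f).foldl g init = L.foldl (fun c a => (f a).foldl g c) init := by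
  induction L generalizing init with
  | nil => simp
  | cons x L ih => simp [List.flatMap_cons, List.foldl_append, ih]

theorem pvGd_entry (m : List (List Int)) (x y : Nat) (hx : x < m.length)
    (hy : y < m[x].length) : pvGd m x y = m[x][y] := by
  have h1 : m.getD x [] = m[x] := by
    rw [List.getD_eq_getElem?_getD, List.getElem?_eq_getElem hx]
    rfl
  unfold pvGd
  rw [h1, List.getD_eq_getElem?_getD, List.getElem?_eq_getElem hy]
  rfl

-- ===== VERDICT (by name: the statement is the Claim_ definition above) =====
theorem compose_containers_adj_spec : Claim_equal_compose_containers_adj := by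
  intro adj containers _ _
  unfold Spec_compose_containers_adj
  have hA : compose_containers_adj adj containers
      = pvRun adj containers (pvPairs containers.length)
          ((List.range containers.length).map
            (fun _ => (List.range containers.length).map (fun _ => (0 : Int)))) := by
    unfold pvRun pvPairs
    rw [foldl_flatMap']
    simp only [List.foldl_map]
    rfl
  set n := containers.length with hn
  set ext0 := (List.range n).map (fun _ => (List.range n).map (fun _ => (0 : Int))) with hext0
  have hs : pvShape ext0 n := by
    constructor
    · simp [hext0]
    · intro r hr
      rcases List.mem_map.mp hr with ⟨_, _, rfl⟩
      simp
  have hz : ∀ x y, pvGd ext0 x y = 0 := by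
    intro x y
    unfold pvGd
    rw [List.getD_eq_getElem?_getD, List.getD_eq_getElem?_getD, hext0, List.getElem?_map]
    cases (List.range n)[x]? with
    | none => simp
    | some a =>
      simp only [Option.map_some, Option.getD_some, List.getElem?_map]
      cases (List.range n)[y]? <;> simp
  have hPall : ∀ p ∈ pvPairs n, p.1 < p.2 ∧ p.2 < n := by
    intro p hp
    obtain ⟨x, y⟩ := p
    exact (mem_pvPairs n x y).mp hp
  obtain ⟨hshA, hgdA⟩ :=
    run_spec adj containers n ext0 hs hz (pvPairs n) hPall (nodup_pvPairs n)
  rw [hA]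
  unfold compose_containers_adj_alt
  set M := pvRun adj containers (pvPairs n) ext0 with hM
  apply List.ext_getElem
  · rw [hshA.1]
    simp [hn]
  · intro x h1 h2
    have hxn : x < n := by
      have := hshA.1
      omega
    rw [List.getElem_map, List.getElem_range]
    apply List.ext_getElem
    · have : M[x] ∈ M := List.getElem_mem h1
      rw [hshA.2 M[x] this]
      simp [hn]
    · intro y h3 h4
      have hyn : y < n := by
        have := hshA.2 M[x] (List.getElem_mem h1)
        omega
      rw [List.getElem_map, List.getElem_range]
      rw [← pvGd_entry M x y h1 h3, hgdA x y hxn hyn]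
      by_cases hxy : x = y
      · subst hxy
        have hm1 : (x, x) ∉ pvPairs n := fun hm => by
          have := (mem_pvPairs n x x).mp hm
          omega
        rw [if_neg hm1, if_neg hm1]
        unfold pvCell
        rw [if_pos rfl]
      · have hcell := pvCell_eq adj containers x y (by omega) (by omega) hxy
        rw [hcell]
        by_cases hlt : x < y
        · have hmin : min x y = x := by omega
          have hmax : max x y = y := by omega
          rw [hmin, hmax,
            if_pos ((mem_pvPairs n x y).mpr ⟨hlt, hyn⟩)]
        · have hylt : y < x := by omega
          have hmin : min x y = y := by omega
          have hmax : max x y = x := by omega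
          rw [hmin, hmax,
            if_neg (fun hm => by have := (mem_pvPairs n x y).mp hm; omega),
            if_pos ((mem_pvPairs n y x).mpr ⟨hylt, hxn⟩)]
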